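-- pv_equiv track=rewrite | github.com/comecattin/SULLEY | src/sulley/write_file.py | shift_multiple_local_frame
-- ===== SOURCE A (Python) =====
-- def shift_multiple_local_frame(local_frame):
--     """
--     Shift the local frame if the output local frame is from multiple molecules.
--
--     Parameters
--     ----------
--     local_frame : list
--         Local frame.
--
--     Returns
--     -------
--     local_frame_shifted : list
--         Local frame shifted
--     """
--     shift = 0
--     local_frame_shifted = []
--     for i, lf in enumerate(local_frame):
--         if lf[0] == 1 and i != 0:
--             shift = i
--         shifted = [
--             idx + shift if idx > 0 else
--             idx - shift if idx < 0 else
--             0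
--             for idx in lf
--         ]
--         local_frame_shifted.append(shifted)
--     return local_frame_shifted
-- ===== SOURCE B (Python) =====
-- def shift_multiple_local_frame(local_frame):
--     # Segment the frames into molecule blocks (a new block begins wherever a
--     # frame starts with 1, except at position 0), then shift each block
--     # uniformly by its starting offset.
--     starts = [i for i, lf in enumerate(local_frame) if lf[0] == 1 and i != 0]
--     boundaries = [0] + starts + [len(local_frame)]
--     result = []
--     for b, e in zip(boundaries, boundaries[1:]):
--         for lf in local_frame[b:e]:
--             result.append([idx + b if idx > 0 else idx - b if idx < 0 else 0
--                            for idx in lf])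
--     return result
-- ===== Notes on version B (the rewrite author's own statement) =====
-- stated objective: alternative
-- what changed: B segments the frame list into molecule blocks at the positions where a frame starts with 1, builds the boundary list once, and shifts each block uniformly by its starting offset via slices; A instead threads a running shift through a single stateful loop.
import Mathlib
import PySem

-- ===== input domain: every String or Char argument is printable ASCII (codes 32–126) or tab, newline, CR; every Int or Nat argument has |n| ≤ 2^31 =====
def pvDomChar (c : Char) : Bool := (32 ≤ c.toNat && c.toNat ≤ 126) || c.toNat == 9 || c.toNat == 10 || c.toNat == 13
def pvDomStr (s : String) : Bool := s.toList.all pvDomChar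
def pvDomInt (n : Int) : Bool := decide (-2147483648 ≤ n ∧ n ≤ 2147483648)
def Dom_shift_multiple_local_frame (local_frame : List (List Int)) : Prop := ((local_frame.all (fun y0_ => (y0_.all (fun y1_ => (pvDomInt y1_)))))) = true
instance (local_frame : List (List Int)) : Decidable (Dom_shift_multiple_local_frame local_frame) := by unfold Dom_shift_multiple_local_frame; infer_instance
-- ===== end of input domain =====

-- B replaces A's single stateful loop by block segmentation: it collects the
-- block-start positions, builds the boundary list, and shifts each block
-- (a slice of the input) uniformly by its starting offset.

-- ===== PORT A =====
-- the per-element conditional 'idx + shift if idx > 0 else idx - shift if idx < 0 else 0'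
def pvRow (shift : Int) (lf : List Int) : List Int :=
  lf.map (fun idx => if idx > 0 then idx + shift else if idx < 0 then idx - shift else 0)

def shift_multiple_local_frame (local_frame : List (List Int)) : List (List Int) :=
  ((PySem.List.enumerate local_frame 0).foldl
    (fun (st : Int × List (List Int)) (p : Int × List Int) =>
      let shift := if PySem.List.pyGet? p.2 0 = some 1 ∧ p.1 ≠ 0 then p.1 else st.1
      (shift, st.2 ++ [pvRow shift p.2]))
    (0, [])).2

-- ===== PORT B =====
def shift_multiple_local_frame_alt (local_frame : List (List Int)) : List (List Int) :=
  let starts : List Int :=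
    ((PySem.List.enumerate local_frame 0).filter
      (fun p => decide (PySem.List.pyGet? p.2 0 = some 1 ∧ p.1 ≠ 0))).map (fun p => p.1)
  let boundaries : List Int := [0] ++ starts ++ [(local_frame.length : Int)]
  (boundaries.zip (PySem.List.slice boundaries (some 1) none)).foldl
    (fun result q =>
      (PySem.List.slice local_frame (some q.1) (some q.2)).foldl
        (fun result lf =>
          result ++ [lf.map (fun idx =>
            if idx > 0 then idx + q.1 else if idx < 0 then idx - q.1 else 0)])
        result)
    []

-- ===== PRECONDITION & SPEC =====
-- Pre_ excludes inputs containing an empty sub-frame: there Python A raises IndexError on lf[0] (B raises too).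
def Pre_shift_multiple_local_frame (local_frame : List (List Int)) : Prop :=
  ∀ lf ∈ local_frame, lf ≠ []
instance (local_frame : List (List Int)) : Decidable (Pre_shift_multiple_local_frame local_frame) := by
  unfold Pre_shift_multiple_local_frame; infer_instance

def pvWitness_shift_multiple_local_frame : List (List Int) := [[2, -1, 0], [1, 3], [1, -2]]

def Spec_shift_multiple_local_frame (local_frame : List (List Int)) (out : List (List Int)) : Prop := out = shift_multiple_local_frame_alt local_frame
instance (local_frame : List (List Int)) (out : List (List Int)) : Decidable (Spec_shift_multiple_local_frame local_frame out) := by unfold Spec_shift_multiple_local_frame; infer_instance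

-- ===== CLAIM =====
def Claim_equal_shift_multiple_local_frame : Prop := ∀ (local_frame : List (List Int)), Dom_shift_multiple_local_frame local_frame → Pre_shift_multiple_local_frame local_frame → Spec_shift_multiple_local_frame local_frame (shift_multiple_local_frame local_frame)

-- ===== LEMMAS AND PROOFS =====
def castL (bs : List Nat) : List Int := bs.map (fun n => (n : Int))

theorem castL_nil : castL [] = [] := rfl
theorem castL_cons (b : Nat) (bs : List Nat) : castL (b :: bs) = (b : Int) :: castL bs := rfl

-- reference recursion for A: frames with absolute index k onwards, incoming shift s
def rowsFrom : List (List Int) → Nat → Int → List (List Int)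
  | [], _, _ => []
  | x :: t, k, s =>
    let s' := if PySem.List.pyGet? x 0 = some 1 ∧ k ≠ 0 then (k : Int) else s
    pvRow s' x :: rowsFrom t (k + 1) s'

-- block-start positions of the suffix starting at absolute index k
def startsN : List (List Int) → Nat → List Nat
  | [], _ => []
  | x :: t, k =>
    (if PySem.List.pyGet? x 0 = some 1 ∧ k ≠ 0 then [k] else []) ++ startsN t (k + 1)

-- reference recursion for B: apply blocks bs to the suffix l (absolute index k, shift s)
def applyBlocks : List Nat → List (List Int) → Nat → Int → List (List Int)
  | [], l, _, s => l.map (pvRow s)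
  | b :: rest, l, k, s =>
    (l.take (b - k)).map (pvRow s) ++ applyBlocks rest (l.drop (b - k)) b (b : Int)

theorem foldA_eq (l : List (List Int)) : ∀ (k : Nat) (s : Int) (acc : List (List Int)),
    ((PySem.List.enumerate l (k : Int)).foldl
      (fun (st : Int × List (List Int)) (p : Int × List Int) =>
        let shift := if PySem.List.pyGet? p.2 0 = some 1 ∧ p.1 ≠ 0 then p.1 else st.1
        (shift, st.2 ++ [pvRow shift p.2]))
      (s, acc)).2 = acc ++ rowsFrom l k s := by
  induction l with
  | nil => intro k s acc; simp [rowsFrom, PySem.List.enumerate_nil]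
  | cons x t ih =>
    intro k s acc
    rw [PySem.List.enumerate_cons]
    have hk1 : (k : Int) + 1 = ((k + 1 : Nat) : Int) := by push_cast; ring
    simp only [List.foldl_cons, rowsFrom, Int.natCast_ne_zero]
    by_cases hc : PySem.List.pyGet? x 0 = some 1 ∧ k ≠ 0
    · rw [if_pos hc]; rw [hk1, ih]; simp
    · rw [if_neg hc]; rw [hk1, ih]; simp

theorem portA_eq_rowsFrom (l : List (List Int)) :
    shift_multiple_local_frame l = rowsFrom l 0 0 := by
  unfold shift_multiple_local_frame
  have := foldA_eq l 0 0 []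
  simpa using this

theorem startsN_ge (l : List (List Int)) : ∀ (k : Nat), ∀ b ∈ startsN l k, k ≤ b := by
  induction l with
  | nil => intro k b hb; simp [startsN] at hb
  | cons x t ih =>
    intro k b hb
    simp only [startsN, List.mem_append] at hb
    rcases hb with hb | hb
    · split at hb <;> simp_all
    · exact Nat.le_of_succ_le (ih (k + 1) b hb)

theorem startsN_le (l : List (List Int)) : ∀ (k : Nat), ∀ b ∈ startsN l k, b ≤ k + l.length := by
  induction l with
  | nil => intro k b hb; simp [startsN] at hb
  | cons x t ih =>
    intro k b hb
    simp only [startsN, List.mem_append] at hb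
    rcases hb with hb | hb
    · split at hb <;> simp_all
    · have := ih (k + 1) b hb; simp at this ⊢; omega

theorem startsN_pairwise (l : List (List Int)) : ∀ (k b : Nat), b ≤ k →
    List.Pairwise (· ≤ ·) (b :: startsN l k) := by
  induction l with
  | nil => intro k b _; simp [startsN]
  | cons x t ih =>
    intro k b hbk
    simp only [startsN]
    split
    · simp only [List.singleton_append]
      refine List.pairwise_cons.mpr ⟨?_, ih (k + 1) k (Nat.le_succ k)⟩
      intro a ha
      rcases List.mem_cons.mp ha with h | h
      · omega
      · have := startsN_ge t (k + 1) a h; omega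
    · simpa using ih (k + 1) b (Nat.le_succ_of_le hbk)

theorem applyBlocks_cons (bs : List Nat) (x : List Int) (t : List (List Int)) (k : Nat) (s : Int)
    (h : ∀ b ∈ bs, k + 1 ≤ b) :
    applyBlocks bs (x :: t) k s = pvRow s x :: applyBlocks bs t (k + 1) s := by
  cases bs with
  | nil => simp [applyBlocks]
  | cons b rest =>
    have hb : k + 1 ≤ b := h b (by simp)
    have h1 : b - k = (b - (k + 1)) + 1 := by omega
    simp only [applyBlocks, h1, List.take_succ_cons, List.drop_succ_cons, List.map_cons,
      List.cons_append]

theorem rowsFrom_eq_applyBlocks (l : List (List Int)) : ∀ (k : Nat) (s : Int),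
    rowsFrom l k s = applyBlocks (startsN l k) l k s := by
  induction l with
  | nil => intro k s; simp [rowsFrom, startsN, applyBlocks]
  | cons x t ih =>
    intro k s
    simp only [rowsFrom, startsN]
    by_cases hc : PySem.List.pyGet? x 0 = some 1 ∧ k ≠ 0
    · rw [if_pos hc, if_pos hc]
      simp only [List.singleton_append, applyBlocks, Nat.sub_self, List.take_zero,
        List.map_nil, List.drop_zero, List.nil_append]
      rw [applyBlocks_cons _ _ _ _ _ (fun b hb => startsN_ge t (k + 1) b hb), ih]
    · rw [if_neg hc, if_neg hc]
      simp only [List.nil_append]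
      rw [applyBlocks_cons _ _ _ _ _ (fun b hb => startsN_ge t (k + 1) b hb), ih]

-- one block of B: a slice of the full list, shifted by its start
def pvBlock (full : List (List Int)) (q : Int × Int) : List (List Int) :=
  (PySem.List.slice full (some q.1) (some q.2)).map (pvRow q.1)

theorem foldB_flat (pairs : List (Int × Int)) (full : List (List Int)) :
    ∀ (acc : List (List Int)),
    pairs.foldl
      (fun result q =>
        (PySem.List.slice full (some q.1) (some q.2)).foldl
          (fun result lf =>
            result ++ [lf.map (fun idx =>
              if idx > 0 then idx + q.1 else if idx < 0 then idx - q.1 else 0)])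
          result)
      acc = acc ++ pairs.flatMap (pvBlock full) := by
  intro acc
  simp only [PySem.List.foldl_append_singleton_eq_map]
  rw [PySem.List.foldl_append_eq_flatMap]
  rfl

theorem flat_eq_applyBlocks (bs : List Nat) : ∀ (b : Nat) (full : List (List Int)),
    List.Pairwise (· ≤ ·) (b :: bs) → (∀ x ∈ bs, x ≤ full.length) → b ≤ full.length →
    ((((b : Int) :: (castL bs ++ [(full.length : Int)])).zip
      (castL bs ++ [(full.length : Int)])).flatMap (pvBlock full))
    = applyBlocks bs (full.drop b) b (b : Int) := by
  induction bs with
  | nil =>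
    intro b full _ _ hb
    simp only [castL_nil, List.nil_append, List.zip_cons_cons, List.zip_nil_right,
      List.flatMap_cons, List.flatMap_nil, List.append_nil, applyBlocks, pvBlock]
    rw [PySem.List.slice_natCast]
    rw [List.take_of_length_le (by simp)]
  | cons b' rest ih =>
    intro b full hp hle hb
    have hp' := List.pairwise_cons.mp hp
    have hbb' : b ≤ b' := hp'.1 b' (by simp)
    have hb' : b' ≤ full.length := hle b' (by simp)
    simp only [castL_cons, List.cons_append, List.zip_cons_cons, List.flatMap_cons]
    rw [ih b' full hp'.2 (fun x hx => hle x (by simp [hx])) hb']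
    simp only [applyBlocks, pvBlock]
    rw [PySem.List.slice_natCast]
    have hd : full.drop b' = (full.drop b).drop (b' - b) := by
      rw [List.drop_drop]; congr 1; omega
    rw [hd]

theorem startsI (l : List (List Int)) : ∀ (k : Nat),
    (((PySem.List.enumerate l (k : Int)).filter
      (fun p => decide (PySem.List.pyGet? p.2 0 = some 1 ∧ p.1 ≠ 0))).map (fun p => p.1))
    = castL (startsN l k) := by
  induction l with
  | nil => intro k; simp [startsN, castL, PySem.List.enumerate_nil]
  | cons x t ih =>
    intro k
    rw [PySem.List.enumerate_cons]
    have hk1 : (k : Int) + 1 = ((k + 1 : Nat) : Int) := by push_cast; ring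
    simp only [startsN, List.filter_cons, decide_eq_true_eq, Int.natCast_ne_zero]
    by_cases hc : PySem.List.pyGet? x 0 = some 1 ∧ k ≠ 0
    · rw [if_pos hc, if_pos hc, hk1]
      simp only [List.map_cons, List.singleton_append, castL_cons]
      rw [ih]
    · rw [if_neg hc, if_neg hc, hk1]
      simp only [List.nil_append]
      exact ih (k + 1)

theorem startsI0 (l : List (List Int)) :
    (((PySem.List.enumerate l 0).filter
      (fun p => decide (PySem.List.pyGet? p.2 0 = some 1 ∧ p.1 ≠ 0))).map (fun p => p.1))
    = castL (startsN l 0) := by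
  have := startsI l 0
  simpa using this

theorem shift_multiple_local_frame_eq_alt (local_frame : List (List Int)) :
    shift_multiple_local_frame local_frame = shift_multiple_local_frame_alt local_frame := by
  unfold shift_multiple_local_frame_alt
  rw [portA_eq_rowsFrom, rowsFrom_eq_applyBlocks]
  simp only [startsI0, PySem.List.slice_from_one, List.singleton_append]
  rw [foldB_flat]
  simp only [List.nil_append]
  have H := flat_eq_applyBlocks (startsN local_frame 0) 0 local_frame
    (startsN_pairwise local_frame 0 0 (Nat.le_refl 0))
    (fun x hx => by have := startsN_le local_frame 0 x hx; simpa using this)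
    (Nat.zero_le _)
  simp only [Nat.cast_zero, List.drop_zero] at H
  exact H.symm

-- ===== VERDICT =====
theorem shift_multiple_local_frame_spec : Claim_equal_shift_multiple_local_frame := by
  intro local_frame _ _
  exact shift_multiple_local_frame_eq_alt local_frame
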